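-- pv_equiv track=rewrite | github.com/awslabs/llmeter | llmeter/live_display.py | _group_stats
-- ===== SOURCE A (Python) =====
-- from collections import OrderedDict
--
-- DEFAULT_GROUPS: tuple[tuple[str, tuple[str, ...]], ...] = (
--     ("Throughput", ("rpm", "tps")),
--     ("TTFT", ("ttft",)),
--     ("TTLT", ("ttlt",)),
--     ("Tokens", ("token",)),
--     ("Errors", ("fail",)),
--     ("Other", ("",)),
-- )
--
-- def _classify(
--     key: str,
--     groups: tuple[tuple[str, tuple[str, ...]], ...] = DEFAULT_GROUPS,
-- ) -> str:
--     """Return the group name for a stat key based on substring matching.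
--
--     Matches the key (case-insensitive) against *groups*. The first matching
--     pattern determines the group. Unmatched keys are placed in ``"Other"``.
--
--     Args:
--         key (str): The stat display label to classify (e.g. ``"p50_ttft"``).
--         groups: Group definitions to match against. Defaults to
--             :data:`DEFAULT_GROUPS`.
--
--     Returns:
--         str: The group name (e.g. ``"TTFT"``, ``"Throughput"``, ``"Other"``).
--     """
--     key_lower = key.lower()
--     for group_name, patterns in groups:
--         for pattern in patterns:
--             if pattern and pattern in key_lower:
--                 return group_name
--     return "Other"
--
-- def _group_stats(
--     stats: dict[str, str],
--     groups: tuple[tuple[str, tuple[str, ...]], ...] = DEFAULT_GROUPS,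
-- ) -> OrderedDict[str, list[tuple[str, str]]]:
--     """Organize stats into ordered groups for display.
--
--     Each stat key is classified via :func:`_classify` and placed into the
--     corresponding group. Groups are returned in the canonical order defined
--     by *groups*, with empty groups omitted.
--
--     Args:
--         stats (dict[str, str]): Mapping of stat labels to formatted values.
--         groups: Group definitions controlling classification and order.
--             Defaults to :data:`DEFAULT_GROUPS`.
--
--     Returns:
--         OrderedDict[str, list[tuple[str, str]]]: Groups in display order, where
--         each value is a list of ``(label, formatted_value)`` tuples.
--     """
--     buckets: dict[str, list[tuple[str, str]]] = {}
--     for k, v in stats.items():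
--         group = _classify(k, groups)
--         buckets.setdefault(group, []).append((k, v))
--     group_order = [name for name, _ in groups]
--     return OrderedDict((g, buckets[g]) for g in group_order if g in buckets)
-- ===== SOURCE B (Python) =====
-- from collections import OrderedDict
--
-- DEFAULT_GROUPS: tuple[tuple[str, tuple[str, ...]], ...] = (
--     ("Throughput", ("rpm", "tps")),
--     ("TTFT", ("ttft",)),
--     ("TTLT", ("ttlt",)),
--     ("Tokens", ("token",)),
--     ("Errors", ("fail",)),
--     ("Other", ("",)),
-- )
--
-- def _group_stats(
--     stats: dict[str, str],
--     groups: tuple[tuple[str, tuple[str, ...]], ...] = DEFAULT_GROUPS,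
-- ) -> "OrderedDict[str, list[tuple[str, str]]]":
--     # One pass tags each stat with its group name; then one pass over the
--     # canonical group order emits each distinct group's bucket by filtering.
--     tagged = []
--     for k, v in stats.items():
--         kl = k.lower()
--         name = next(
--             (g for g, pats in groups if any(p and p in kl for p in pats)),
--             "Other",
--         )
--         tagged.append((name, k, v))
--     out: "OrderedDict[str, list[tuple[str, str]]]" = OrderedDict()
--     seen = set()
--     for name, _ in groups:
--         if name in seen:
--             continue
--         seen.add(name)
--         bucket = [(k, v) for g, k, v in tagged if g == name]
--         if bucket:
--             out[name] = bucket
--     return out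
-- ===== Notes on version B (the rewrite author's own statement) =====
-- stated objective: alternative
-- what changed: B replaces A's dict-of-buckets accumulation (setdefault/append per stat, then an OrderedDict comprehension over group names) with a tag-then-filter scheme: one pass tags each stat with its group via next()/any(), then a loop over the canonical group order emits each distinct group's bucket by filtering the tagged list.
import Mathlib
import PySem

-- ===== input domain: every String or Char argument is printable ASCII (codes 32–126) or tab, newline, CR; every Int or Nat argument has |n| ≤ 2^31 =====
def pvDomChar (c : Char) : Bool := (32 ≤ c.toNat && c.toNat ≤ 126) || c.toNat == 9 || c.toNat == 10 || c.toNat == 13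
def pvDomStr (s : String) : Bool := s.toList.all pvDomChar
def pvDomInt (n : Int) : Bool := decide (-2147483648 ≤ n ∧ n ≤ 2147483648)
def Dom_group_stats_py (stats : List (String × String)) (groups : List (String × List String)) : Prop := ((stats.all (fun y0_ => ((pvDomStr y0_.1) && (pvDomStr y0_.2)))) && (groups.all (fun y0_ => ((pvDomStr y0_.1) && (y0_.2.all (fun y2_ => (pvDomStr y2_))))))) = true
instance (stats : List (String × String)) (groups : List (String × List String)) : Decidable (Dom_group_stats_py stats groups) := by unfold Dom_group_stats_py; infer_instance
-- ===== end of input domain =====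

-- B tags every stat with its group in one pass and then emits buckets by filtering per
-- canonical group, instead of A's dict-of-buckets accumulation; objective: alternative.

-- ===== PORT A =====
-- inner 'for pattern in patterns: if pattern and pattern in key_lower: return group_name'
def pvClassifyInner (groupName : String) (keyLower : String) : List String → Option String
  | [] => none
  | p :: ps =>
      if (!(p == "")) && PySem.Str.isIn p keyLower then some groupName
      else pvClassifyInner groupName keyLower ps

-- outer loop of _classify, falling through to "Other"
def pvClassifyLoop (keyLower : String) : List (String × List String) → String
  | [] => "Other"
  | gp :: rest =>
      match pvClassifyInner gp.1 keyLower gp.2 with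
      | some g => g
      | none => pvClassifyLoop keyLower rest

def pvClassify (key : String) (groups : List (String × List String)) : String :=
  pvClassifyLoop (PySem.Str.lower key) groups

def group_stats_py (stats : List (String × String)) (groups : List (String × List String)) : List (String × List (String × String)) :=
  -- buckets.setdefault(_classify(k, groups), []).append((k, v))
  let buckets : PySem.Dict String (List (String × String)) :=
    stats.foldl (fun d kv => d.modify (pvClassify kv.1 groups) [] (fun b => b ++ [kv])) PySem.Dict.empty
  let group_order := groups.map (fun p => p.1)
  -- OrderedDict((g, buckets[g]) for g in group_order if g in buckets)
  (group_order.foldl (fun od g => if buckets.contains g then od.insert g (buckets.getD g []) else od) PySem.Dict.empty).items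

-- ===== PORT B =====
-- next((g for g, pats in groups if any(p and p in kl for p in pats)), "Other")
def pvClassifyB (k : String) (groups : List (String × List String)) : String :=
  match groups.find? (fun gp => gp.2.any (fun p => (!(p == "")) && PySem.Str.isIn p (PySem.Str.lower k))) with
  | some gp => gp.1
  | none => "Other"

def group_stats_py_alt (stats : List (String × String)) (groups : List (String × List String)) : List (String × List (String × String)) :=
  let tagged := stats.map (fun kv => (pvClassifyB kv.1 groups, kv))
  (groups.foldl
    (fun (acc : PySem.Set String × List (String × List (String × String))) gp =>
      if PySem.Set.contains acc.1 gp.1 then acc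
      else
        let bucket := (tagged.filter (fun t => t.1 == gp.1)).map (fun t => t.2)
        (PySem.Set.add acc.1 gp.1, if bucket.isEmpty then acc.2 else acc.2 ++ [(gp.1, bucket)]))
    (PySem.Set.empty, [])).2

-- ===== PRECONDITION & SPEC =====
def Spec_group_stats_py (stats : List (String × String)) (groups : List (String × List String)) (out : List (String × List (String × String))) : Prop := out = group_stats_py_alt stats groups
instance (stats : List (String × String)) (groups : List (String × List String)) (out : List (String × List (String × String))) : Decidable (Spec_group_stats_py stats groups out) := by unfold Spec_group_stats_py; infer_instance

-- ===== CLAIM (what is proved, stated in full; the proofs are below) =====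
def Claim_equal_group_stats_py : Prop := ∀ (stats : List (String × String)) (groups : List (String × List String)), Dom_group_stats_py stats groups → Spec_group_stats_py stats groups (group_stats_py stats groups)

-- ===== LEMMAS AND PROOFS =====

-- the bucket that ends up displayed under name g
def pvBf (stats : List (String × String)) (groups : List (String × List String)) (g : String) : List (String × String) :=
  ((stats.map (fun kv => (pvClassifyB kv.1 groups, kv))).filter (fun t => t.1 == g)).map (fun t => t.2)

lemma classifyInner_eq (name kl : String) (ps : List String) :
    pvClassifyInner name kl ps
      = (if ps.any (fun p => (!(p == "")) && PySem.Str.isIn p kl) then some name else none) := by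
  induction ps with
  | nil => simp [pvClassifyInner]
  | cons p ps ih =>
      rw [pvClassifyInner, ih, List.any_cons]
      cases h : ((!(p == "")) && PySem.Str.isIn p kl) <;>
        cases h2 : ps.any (fun p => (!(p == "")) && PySem.Str.isIn p kl) <;> simp_all

lemma classify_eq (k : String) (groups : List (String × List String)) :
    pvClassify k groups = pvClassifyB k groups := by
  unfold pvClassify pvClassifyB
  induction groups with
  | nil => simp [pvClassifyLoop]
  | cons gp rest ih =>
      rw [pvClassifyLoop, classifyInner_eq, List.find?_cons]
      cases (gp.2.any (fun p => (!(p == "")) && PySem.Str.isIn p (PySem.Str.lower k))) <;>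
        simp only [Bool.false_eq_true, if_false, if_true, ih]

lemma buckets_getD (stats : List (String × String)) (groups : List (String × List String)) (g : String) :
    (stats.foldl (fun d kv => d.modify (pvClassify kv.1 groups) [] (fun b => b ++ [kv])) PySem.Dict.empty).getD g []
      = pvBf stats groups g := by
  have hfold : stats.foldl (fun d kv => d.modify (pvClassify kv.1 groups) [] (fun b => b ++ [kv])) PySem.Dict.empty
      = (stats.map (fun kv => (pvClassifyB kv.1 groups, kv))).foldl
          (fun d p => d.modify p.1 [] (fun b => b ++ [p.2])) PySem.Dict.empty := by
    rw [List.foldl_map]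
    simp only [classify_eq]
  rw [hfold, pvBf, PySem.Dict.getD_foldl_modify_append, PySem.Dict.getD_empty, List.nil_append]

lemma buckets_contains (stats : List (String × String)) (groups : List (String × List String)) (g : String) :
    (stats.foldl (fun d kv => d.modify (pvClassify kv.1 groups) [] (fun b => b ++ [kv])) PySem.Dict.empty).contains g
      = !(pvBf stats groups g).isEmpty := by
  have hkeys := PySem.Dict.keys_foldl_modify_key
    (l := stats) (key := fun kv => pvClassify kv.1 groups) (d0 := ([] : List (String × String)))
    (f := fun _ kv => (fun b => b ++ [kv])) (d := PySem.Dict.empty)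
  rw [Bool.eq_iff_iff, PySem.Dict.contains_iff_mem_keys, hkeys]
  have h1 : (!(pvBf stats groups g).isEmpty) = true ↔ ∃ kv ∈ stats, pvClassifyB kv.1 groups = g := by
    simp [pvBf, List.isEmpty_eq_false_iff, List.filter_eq_nil_iff]
  rw [h1]
  simp [PySem.Set.mem_update, PySem.Dict.keys_empty, classify_eq]

lemma dict_insert_self {ν : Type} (d : PySem.Dict String ν) (k : String) (v : ν)
    (hnd : d.keys.Nodup) (h : d.get? k = some v) : d.insert k v = d := by
  apply PySem.Dict.ext
  rw [PySem.Dict.items_insert_of_contains d v (by rw [PySem.Dict.contains_eq_isSome_get?, h]; rfl)]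
  nth_rewrite 2 [show d.items = d.items.map id from (List.map_id d.items).symm]
  apply List.map_congr_left
  intro p hp
  by_cases hpk : p.1 = k
  · have hsome : d.get? k = some p.2 := by
      have := PySem.Dict.get?_of_mem_items (d := d) (k := p.1) (v := p.2) (by simpa using hp) hnd
      rwa [hpk] at this
    rw [h] at hsome
    have hv : v = p.2 := by injection hsome
    rw [if_pos (by simp [hpk]), hv, ← hpk]
    rfl
  · simp [hpk]

lemma fold_items_eq (stats : List (String × String)) (groups : List (String × List String))
    (ns : List (String × List String)) (od : PySem.Dict String (List (String × String)))
    (seen : PySem.Set String) (out : List (String × List (String × String)))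
    (hnd : od.keys.Nodup)
    (hget : ∀ g, od.get? g = if g ∈ seen ∧ pvBf stats groups g ≠ [] then some (pvBf stats groups g) else none)
    (hitems : od.items = out) :
    ((ns.map (fun p => p.1)).foldl (fun od g => if !(pvBf stats groups g).isEmpty then od.insert g (pvBf stats groups g) else od) od).items
      = (ns.foldl
          (fun (acc : PySem.Set String × List (String × List (String × String))) gp =>
            if PySem.Set.contains acc.1 gp.1 then acc
            else (PySem.Set.add acc.1 gp.1,
                  if (pvBf stats groups gp.1).isEmpty then acc.2 else acc.2 ++ [(gp.1, pvBf stats groups gp.1)]))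
          (seen, out)).2 := by
  induction ns generalizing od seen out with
  | nil => simpa using hitems
  | cons gp rest ih =>
      simp only [List.map_cons, List.foldl_cons]
      by_cases hseen : gp.1 ∈ seen
      · have hc : PySem.Set.contains seen gp.1 = true := (PySem.Set.contains_iff seen gp.1).mpr hseen
        rw [hc]
        simp only [reduceIte]
        cases hb : (pvBf stats groups gp.1).isEmpty with
        | true =>
            simp only [Bool.not_true, Bool.false_eq_true, reduceIte]
            exact ih od seen out hnd hget hitems
        | false =>
            simp only [Bool.not_false, reduceIte]
            have hv : od.get? gp.1 = some (pvBf stats groups gp.1) := by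
              rw [hget, if_pos ⟨hseen, by simpa [List.isEmpty_eq_false_iff] using hb⟩]
            rw [dict_insert_self od gp.1 _ hnd hv]
            exact ih od seen out hnd hget hitems
      · have hc : PySem.Set.contains seen gp.1 = false := by
          rw [Bool.eq_false_iff]
          intro hcontra
          exact hseen ((PySem.Set.contains_iff seen gp.1).mp hcontra)
        rw [hc]
        simp only [Bool.false_eq_true, reduceIte]
        have hnone : od.get? gp.1 = none := by
          rw [hget, if_neg]; rintro ⟨h1, _⟩; exact hseen h1
        cases hb : (pvBf stats groups gp.1).isEmpty with
        | true =>
            simp only [Bool.not_true, Bool.false_eq_true, reduceIte]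
            refine ih od (PySem.Set.add seen gp.1) out hnd (fun g => ?_) hitems
            rw [hget]
            by_cases hg : g = gp.1
            · subst hg
              rw [if_neg (fun h => hseen h.1), if_neg]
              rintro ⟨_, hne⟩
              exact hne (List.isEmpty_iff.mp hb)
            · simp [PySem.Set.mem_add, hg]
        | false =>
            simp only [Bool.not_false, reduceIte]
            have hcontains : od.contains gp.1 = false := by
              rw [PySem.Dict.contains_eq_isSome_get?, hnone]; rfl
            refine ih _ (PySem.Set.add seen gp.1) _
              (PySem.Dict.nodup_keys_insert _ _ _ hnd) (fun g => ?_) ?_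
            · rw [PySem.Dict.get?_insert]
              by_cases hg : g = gp.1
              · subst hg
                rw [if_pos rfl, if_pos ⟨by simp [PySem.Set.mem_add],
                  by simpa [List.isEmpty_eq_false_iff] using hb⟩]
              · rw [if_neg hg, hget]
                simp [PySem.Set.mem_add, hg]
            · rw [PySem.Dict.items_insert_of_not_contains _ _ hcontains, hitems]
              simp

-- ===== VERDICT (by name: the statement is the Claim_ definition above) =====
theorem group_stats_py_spec : Claim_equal_group_stats_py := by
  intro stats groups _
  unfold Spec_group_stats_py group_stats_py group_stats_py_alt
  simp only [buckets_getD, buckets_contains]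
  exact fold_items_eq stats groups groups PySem.Dict.empty PySem.Set.empty []
    (by simp [PySem.Dict.keys_empty]) (fun g => by simp [PySem.Dict.get?_empty, PySem.Set.empty]) rfl
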